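-- pv_equiv track=rewrite | github.com/rygold523/compliance_manager | backend/app/api/remediations.py | latest_findings_by_asset_control_title
-- ===== SOURCE A (Python) =====
-- def normalize_timestamp(row):
--     return (
--         row.get("created_at")
--         or row.get("updated_at")
--         or row.get("collected_at")
--         or ""
--     )
--
-- def latest_findings_by_asset_control_title(findings):
--     latest = {}
--
--     for finding in findings:
--         asset_id = finding.get("asset_id") or finding.get("asset") or "unknown"
--         control_id = finding.get("control_id") or finding.get("control") or "UNMAPPED"
--         title = finding.get("title") or ""
--         key = f"{asset_id}:{control_id}:{title.lower()}"
--         ts = normalize_timestamp(finding)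
--
--         if key not in latest or ts > normalize_timestamp(latest[key]):
--             latest[key] = finding
--
--     return latest
-- ===== SOURCE B (Python) =====
-- def _first_truthy(row, names, default):
--     for name in names:
--         value = row.get(name)
--         if value:
--             return value
--     return default
--
--
-- def _key(finding):
--     asset = _first_truthy(finding, ("asset_id", "asset"), "unknown")
--     control = _first_truthy(finding, ("control_id", "control"), "UNMAPPED")
--     title = _first_truthy(finding, ("title",), "")
--     return f"{asset}:{control}:{title.lower()}"
--
--
-- def _ts(finding):
--     return _first_truthy(finding, ("created_at", "updated_at", "collected_at"), "")
--
--
-- def _pick_latest(key, keyed):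
--     best = None
--     for k, finding in keyed:
--         if k == key and (best is None or _ts(finding) > _ts(best)):
--             best = finding
--     return best
--
--
-- def latest_findings_by_asset_control_title(findings):
--     # Staged: tag each finding with its key, list the distinct keys in first-occurrence
--     # order, then pick the latest finding per key by a dedicated scan.
--     keyed = [(_key(finding), finding) for finding in findings]
--     return {key: _pick_latest(key, keyed)
--             for key in dict.fromkeys(key for key, _ in keyed)}
-- ===== Notes on version B (the rewrite author's own statement) =====
-- stated objective: alternative
-- what changed: B replaces A's single-pass compare-and-overwrite dict with a staged pipeline: tag each finding with its key, list the distinct keys in first-occurrence order via dict.fromkeys, and build the result with a dict comprehension whose value is a dedicated per-key scan that keeps the first finding with maximal timestamp (matching A's strict '>' earliest-wins tie-break); helpers use a generic first-truthy-of-names lookup instead of A's 'or' chains.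
import Mathlib
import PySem

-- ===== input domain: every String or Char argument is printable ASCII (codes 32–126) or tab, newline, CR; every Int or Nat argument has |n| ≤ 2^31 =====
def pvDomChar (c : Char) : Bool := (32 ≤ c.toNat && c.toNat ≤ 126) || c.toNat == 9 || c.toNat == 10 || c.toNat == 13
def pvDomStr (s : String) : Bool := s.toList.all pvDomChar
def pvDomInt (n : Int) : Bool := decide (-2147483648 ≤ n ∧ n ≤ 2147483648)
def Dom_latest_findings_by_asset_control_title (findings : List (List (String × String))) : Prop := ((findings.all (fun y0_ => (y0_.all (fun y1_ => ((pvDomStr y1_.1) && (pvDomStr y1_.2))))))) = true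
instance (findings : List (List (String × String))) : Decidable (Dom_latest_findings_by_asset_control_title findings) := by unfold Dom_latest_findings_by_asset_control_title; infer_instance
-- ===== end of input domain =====

-- B is a staged pipeline (tag findings with keys, dedup the keys, pick the latest per key by a
-- dedicated scan) instead of A's single-pass compare-and-overwrite dict (objective: alternative).

-- ===== PORT A =====

-- row.get(k) or <next>: dict.get is a first-match lookup; None and "" are both falsy
def pvGetStr (row : List (String × String)) (k : String) : String :=
  ((PySem.Dict.mk row).get? k).getD ""

-- port of A's helper normalize_timestamp
def pvNormTs (row : List (String × String)) : String :=
  let t1 := pvGetStr row "created_at"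
  if t1 ≠ "" then t1 else
    let t2 := pvGetStr row "updated_at"
    if t2 ≠ "" then t2 else pvGetStr row "collected_at"

-- A's key f"{asset_id}:{control_id}:{title.lower()}" with its inline get-or chains
def pvKey (finding : List (String × String)) : String :=
  let a1 := pvGetStr finding "asset_id"
  let asset_id := if a1 ≠ "" then a1 else
    (let a2 := pvGetStr finding "asset"; if a2 ≠ "" then a2 else "unknown")
  let c1 := pvGetStr finding "control_id"
  let control_id := if c1 ≠ "" then c1 else
    (let c2 := pvGetStr finding "control"; if c2 ≠ "" then c2 else "UNMAPPED")
  let title := pvGetStr finding "title"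
  asset_id ++ ":" ++ control_id ++ ":" ++ PySem.Str.lower title

def latest_findings_by_asset_control_title (findings : List (List (String × String))) : List (String × List (String × String)) :=
  (findings.foldl
    (fun latest finding =>
      let key := pvKey finding
      let ts := pvNormTs finding
      if latest.contains key = false ∨ pvNormTs (latest.getD key []) < ts then
        latest.insert key finding
      else latest)
    PySem.Dict.empty).items

-- ===== PORT B =====

-- _first_truthy(row, names, default): loop over names, return the first truthy row.get(name)
-- (row.get on the association list is a first-match scan, ported as List.find?)
def pvFirstTruthy (row : List (String × String)) : List String → String → String
  | [], dflt => dflt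
  | name :: names, dflt =>
    match row.find? (fun p => p.1 == name) with
    | some pair => if pair.2 ≠ "" then pair.2 else pvFirstTruthy row names dflt
    | none => pvFirstTruthy row names dflt

-- _key(finding)
def pvKeyAlt (finding : List (String × String)) : String :=
  let asset := pvFirstTruthy finding ["asset_id", "asset"] "unknown"
  let control := pvFirstTruthy finding ["control_id", "control"] "UNMAPPED"
  let title := pvFirstTruthy finding ["title"] ""
  asset ++ ":" ++ control ++ ":" ++ PySem.Str.lower title

-- _ts(finding)
def pvTsAlt (finding : List (String × String)) : String :=
  pvFirstTruthy finding ["created_at", "updated_at", "collected_at"] ""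

-- _pick_latest(key, keyed): best-so-far scan; 'best is None' arm first, strict '>' replacement
def pvPickLatest (key : String) (keyed : List (String × List (String × String))) : List (String × String) :=
  match keyed.foldl
      (fun best p =>
        if p.1 = key ∧ (best = none ∨ pvTsAlt (best.getD []) < pvTsAlt p.2) then some p.2 else best)
      none with
  | some best => best
  | none => []  -- unreachable for keys drawn from keyed

def latest_findings_by_asset_control_title_alt (findings : List (List (String × String))) : List (String × List (String × String)) :=
  let keyed := findings.map (fun finding => (pvKeyAlt finding, finding))
  (PySem.List.dedup (keyed.map Prod.fst)).map (fun key => (key, pvPickLatest key keyed))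

-- ===== PRECONDITION & SPEC =====
def Spec_latest_findings_by_asset_control_title (findings : List (List (String × String))) (out : List (String × List (String × String))) : Prop := out = latest_findings_by_asset_control_title_alt findings
instance (findings : List (List (String × String))) (out : List (String × List (String × String))) : Decidable (Spec_latest_findings_by_asset_control_title findings out) := by unfold Spec_latest_findings_by_asset_control_title; infer_instance

-- ===== CLAIM (what is proved, stated in full; the proofs are below) =====
def Claim_equal_latest_findings_by_asset_control_title : Prop := ∀ (findings : List (List (String × String))), Dom_latest_findings_by_asset_control_title findings → Spec_latest_findings_by_asset_control_title findings (latest_findings_by_asset_control_title findings)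

-- ===== LEMMAS AND PROOFS =====

-- A's loop body, named for the proofs (definitionally the lambda inside port A)
def pvStepA (latest : PySem.Dict String (List (String × String))) (finding : List (String × String)) : PySem.Dict String (List (String × String)) :=
  if latest.contains (pvKey finding) = false ∨ pvNormTs (latest.getD (pvKey finding) []) < pvNormTs finding then
    latest.insert (pvKey finding) finding
  else latest

-- proof-side abstraction: first maximal-timestamp element of a group
def pvMaxByTs (group : List (List (String × String))) : List (String × String) :=
  match PySem.List.max? group pvNormTs with
  | some m => m
  | none => []

theorem pvA_eq_items (findings : List (List (String × String))) :
    latest_findings_by_asset_control_title findings = (findings.foldl pvStepA PySem.Dict.empty).items := rfl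

-- the first-truthy scan unfolds to A's get-or step
theorem pvGetStr_eq_find (row : List (String × String)) (k : String) :
    pvGetStr row k = ((row.find? (fun p => p.1 == k)).map Prod.snd).getD "" := by
  induction row with
  | nil => rfl
  | cons p rest ih =>
    obtain ⟨k', v⟩ := p
    by_cases h : k' = k
    · simp [pvGetStr, PySem.Dict.get?_mk_cons, h]
    · simpa [pvGetStr, PySem.Dict.get?_mk_cons, h] using ih

theorem pvFirstTruthy_nil (row : List (String × String)) (d : String) :
    pvFirstTruthy row [] d = d := rfl

theorem pvFirstTruthy_cons (row : List (String × String)) (k : String) (ks : List String) (d : String) :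
    pvFirstTruthy row (k :: ks) d
      = if pvGetStr row k ≠ "" then pvGetStr row k else pvFirstTruthy row ks d := by
  rw [pvGetStr_eq_find]
  cases hf : row.find? (fun p => p.1 == k) with
  | none => simp [pvFirstTruthy, hf]
  | some pair => by_cases h : pair.2 = "" <;> simp [pvFirstTruthy, hf, h]

theorem if_ne_empty (s : String) : (if s ≠ "" then s else "") = s := by
  split <;> simp_all

theorem pvTsAlt_eq (f : List (String × String)) : pvTsAlt f = pvNormTs f := by
  simp only [pvTsAlt, pvFirstTruthy_cons, pvFirstTruthy_nil, if_ne_empty, pvNormTs]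

theorem pvKeyAlt_eq (f : List (String × String)) : pvKeyAlt f = pvKey f := by
  simp only [pvKeyAlt, pvFirstTruthy_cons, pvFirstTruthy_nil, if_ne_empty, pvKey]

-- proof-side name for the running first-maximum fold
def pvRunMax (gs : List (List (String × String))) (acc : Option (List (String × String))) : Option (List (String × String)) :=
  gs.foldl
    (fun acc x =>
      match acc with
      | none => some x
      | some m => if pvNormTs m < pvNormTs x then some x else some m)
    acc

theorem pvRunMax_eq_max? (gs : List (List (String × String))) :
    pvRunMax gs none = PySem.List.max? gs pvNormTs := by
  unfold pvRunMax PySem.List.max?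
  apply PySem.List.foldl_congr_mem
  intro acc x _
  cases acc <;> rfl

-- B's per-key scan over the tagged list is the running first-maximum over the key's group
theorem pvPick_foldl (key : String) (l : List (List (String × String))) :
    ∀ acc : Option (List (String × String)),
    (l.map (fun finding => (pvKeyAlt finding, finding))).foldl
        (fun best p =>
          if p.1 = key ∧ (best = none ∨ pvTsAlt (best.getD []) < pvTsAlt p.2) then some p.2 else best)
        acc
      = pvRunMax (l.filter (fun f => pvKey f == key)) acc := by
  unfold pvRunMax
  induction l with
  | nil => intro acc; rfl
  | cons f t ih =>
    intro acc
    simp only [List.map_cons, List.foldl_cons, List.filter_cons]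
    by_cases h : pvKey f = key
    · rw [if_pos (show (pvKey f == key) = true by simpa using h), List.foldl_cons, ih]
      congr 1
      cases acc with
      | none => simp [pvKeyAlt_eq, h]
      | some m =>
        by_cases hlt : pvNormTs m < pvNormTs f <;>
          simp [pvKeyAlt_eq, pvTsAlt_eq, h, hlt]
    · rw [if_neg (show ¬ ((pvKey f == key) = true) by simpa using h), ih]
      congr 1
      simp [pvKeyAlt_eq, h]

theorem pvPickLatest_eq (key : String) (findings : List (List (String × String))) :
    pvPickLatest key (findings.map (fun finding => (pvKeyAlt finding, finding)))
      = pvMaxByTs (findings.filter (fun f => pvKey f == key)) := by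
  unfold pvPickLatest
  rw [pvPick_foldl]
  rw [pvRunMax_eq_max?]
  unfold pvMaxByTs
  cases PySem.List.max? (findings.filter (fun f => pvKey f == key)) pvNormTs <;> rfl

-- invariant of A's loop: keys in first-occurrence order, value = first maximal of the key's group
theorem pvA_inv (l : List (List (String × String))) :
    (l.foldl pvStepA PySem.Dict.empty).keys = PySem.Set.ofList (l.map pvKey)
    ∧ ∀ k : String, l.filter (fun f => pvKey f == k) ≠ [] →
        (l.foldl pvStepA PySem.Dict.empty).getD k [] = pvMaxByTs (l.filter (fun f => pvKey f == k)) := by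
  induction l using List.reverseRecOn with
  | nil => exact ⟨rfl, fun k h => absurd rfl h⟩
  | append_singleton l f ih =>
    obtain ⟨ihk, ihv⟩ := ih
    rw [List.foldl_append]
    simp only [List.foldl]
    set d := l.foldl pvStepA PySem.Dict.empty with hd
    have hmemkeys : ∀ k : String, (d.contains k = true) ↔ k ∈ l.map pvKey := by
      intro k
      rw [PySem.Dict.contains_iff_mem_keys, ihk, PySem.Set.mem_ofList]
    have hfilter_ne : ∀ k : String, k ∈ l.map pvKey ↔ l.filter (fun f => pvKey f == k) ≠ [] := by
      intro k
      constructor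
      · intro hmem hnil
        obtain ⟨g, hg, hgk⟩ := List.mem_map.mp hmem
        exact (List.filter_eq_nil_iff.mp hnil g hg) (by simp [hgk])
      · intro hne
        obtain ⟨g, hg⟩ := List.exists_mem_of_ne_nil _ hne
        have := List.mem_filter.mp hg
        exact List.mem_map.mpr ⟨g, this.1, by simpa using this.2⟩
    have hmax_snoc : ∀ (gs : List (List (String × String))), gs ≠ [] →
        pvMaxByTs (gs ++ [f]) = if pvNormTs (pvMaxByTs gs) < pvNormTs f then f else pvMaxByTs gs := by
      intro gs h
      obtain ⟨m, hm⟩ : ∃ m, PySem.List.max? gs pvNormTs = some m := by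
        cases hmm : PySem.List.max? gs pvNormTs with
        | none => exact absurd ((PySem.List.max?_eq_none_iff ..).mp hmm) h
        | some m => exact ⟨m, rfl⟩
      have hstep : PySem.List.max? (gs ++ [f]) pvNormTs =
          if pvNormTs m < pvNormTs f then some f else some m := by
        unfold PySem.List.max? at hm ⊢
        rw [List.foldl_append, hm]
        simp only [List.foldl]
      by_cases hlt : pvNormTs m < pvNormTs f <;>
        simp [pvMaxByTs, hm, hstep, hlt]
    have hkeys_step : (pvStepA d f).keys = PySem.Set.add d.keys (pvKey f) := by
      by_cases hc : d.contains (pvKey f) = true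
      · have hmem : pvKey f ∈ d.keys := (PySem.Dict.contains_iff_mem_keys d (pvKey f)).mp hc
        have : (pvStepA d f).keys = d.keys := by
          unfold pvStepA
          split
          · exact PySem.Dict.keys_insert_of_contains d f hc
          · rfl
        rw [this]
        simp [PySem.Set.add, PySem.Set.contains, hmem]
      · have hc' : d.contains (pvKey f) = false := by simpa using hc
        have hmem : pvKey f ∉ d.keys := fun hx =>
          hc ((PySem.Dict.contains_iff_mem_keys d (pvKey f)).mpr hx)
        have : (pvStepA d f).keys = d.keys ++ [pvKey f] := by
          unfold pvStepA
          rw [if_pos (Or.inl hc')]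
          exact PySem.Dict.keys_insert_of_not_contains d f hc'
        rw [this]
        simp [PySem.Set.add, PySem.Set.contains, hmem]
    have hkeys : (pvStepA d f).keys = PySem.Set.ofList ((l ++ [f]).map pvKey) := by
      rw [hkeys_step, ihk, List.map_append, PySem.Set.ofList_append]
      simp [PySem.Set.update_cons, PySem.Set.update_nil]
    refine ⟨hkeys, ?_⟩
    intro k hne
    by_cases hk : k = pvKey f
    · subst hk
      have hfl : (l ++ [f]).filter (fun g => pvKey g == pvKey f) = l.filter (fun g => pvKey g == pvKey f) ++ [f] := by
        simp [List.filter_append]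
      by_cases hc : d.contains (pvKey f) = true
      · have hlf : l.filter (fun g => pvKey g == pvKey f) ≠ [] := (hfilter_ne _).mp ((hmemkeys _).mp hc)
        have hval := ihv _ hlf
        rw [hfl, hmax_snoc _ hlf, ← hval]
        unfold pvStepA
        by_cases hlt : pvNormTs (d.getD (pvKey f) []) < pvNormTs f
        · rw [if_pos (Or.inr hlt), if_pos hlt]
          simp
        · rw [if_neg (by simp [hc, hlt]), if_neg hlt]
      · have hc' : d.contains (pvKey f) = false := by simpa using hc
        have hlf : l.filter (fun g => pvKey g == pvKey f) = [] := by
          by_contra hx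
          exact hc ((hmemkeys _).mpr ((hfilter_ne _).mpr hx))
        rw [hfl, hlf]
        unfold pvStepA
        rw [if_pos (Or.inl hc')]
        simp [pvMaxByTs, PySem.List.max?, List.foldl]
    · have hfl : (l ++ [f]).filter (fun g => pvKey g == k) = l.filter (fun g => pvKey g == k) := by
        simp [List.filter_append, Ne.symm hk]
      rw [hfl] at hne ⊢
      have hgetD : (pvStepA d f).getD k [] = d.getD k [] := by
        unfold pvStepA
        split
        · rw [PySem.Dict.getD_insert]
          simp [hk]
        · rfl
      rw [hgetD]
      exact ihv k hne

-- ===== VERDICT (by name: the statement is the Claim_ definition above) =====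
theorem latest_findings_by_asset_control_title_spec : Claim_equal_latest_findings_by_asset_control_title := by
  intro findings _
  unfold Spec_latest_findings_by_asset_control_title
  obtain ⟨hkeys, hval⟩ := pvA_inv findings
  have hAnodup : (findings.foldl pvStepA PySem.Dict.empty).keys.Nodup :=
    hkeys ▸ PySem.Set.nodup_ofList _
  rw [pvA_eq_items]
  show _ = (PySem.List.dedup ((findings.map (fun f => (pvKeyAlt f, f))).map Prod.fst)).map
      (fun key => (key, pvPickLatest key (findings.map (fun f => (pvKeyAlt f, f)))))
  rw [PySem.Dict.items_eq_map_keys _ hAnodup [], hkeys]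
  have hmapkeys : (findings.map (fun f => (pvKeyAlt f, f))).map Prod.fst = findings.map pvKey := by
    rw [List.map_map]
    exact List.map_congr_left (fun f _ => pvKeyAlt_eq f)
  rw [hmapkeys, PySem.List.dedup_eq_ofList]
  apply List.map_congr_left
  intro k hkmem
  have hkmem' : k ∈ findings.map pvKey := (PySem.Set.mem_ofList _ k).mp hkmem
  have hne : findings.filter (fun f => pvKey f == k) ≠ [] := by
    obtain ⟨g, hg, hgk⟩ := List.mem_map.mp hkmem'
    intro hnil
    exact (List.filter_eq_nil_iff.mp hnil g hg) (by simp [hgk])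
  rw [hval k hne, pvPickLatest_eq]
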